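-- pv_equiv track=rewrite | github.com/Caskman/advent | 2023/14_b/run.py | shift_rocks
-- ===== SOURCE A (Python) =====
-- def shift_rocks(grid):
--     for col in range(len(grid[0])):
--         cur = 0
--         for row in range(len(grid)):
--             if grid[row][col] == "#":
--                 cur = row + 1
--             elif grid[row][col] == "O":
--                 if cur == row:
--                     cur += 1
--                 else:
--                     grid[cur][col] = "O"
--                     grid[row][col] = "."
--                     cur += 1
--     return grid
-- ===== SOURCE B (Python) =====
-- def shift_rocks(grid):
--     # Mutates grid in place (same as A) and returns the same object.
--     width = len(grid[0])
--     height = len(grid)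
--     for col in range(width):
--         column = [grid[r][col] for r in range(height)]
--         start = 0
--         for end in range(height + 1):
--             if end == height or column[end] == "#":
--                 k = sum(1 for i in range(start, end) if column[i] == "O")
--                 for i in range(start, end):
--                     if i < start + k:
--                         grid[i][col] = "O"
--                     elif column[i] == "O":
--                         grid[i][col] = "."
--                     else:
--                         grid[i][col] = column[i]
--                 start = end + 1
--     return grid
-- ===== Notes on version B (the rewrite author's own statement) =====
-- stated objective: alternative
-- what changed: Replaces A's moving write-pointer that relocates each 'O' as it is encountered with a per-column segmentation: read the column once, split it at '#' barriers, count the 'O's in each segment and rewrite the segment as that many 'O's followed by the non-'O' cells (original 'O' cells become '.'); same in-place mutation and return value.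
import Mathlib
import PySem

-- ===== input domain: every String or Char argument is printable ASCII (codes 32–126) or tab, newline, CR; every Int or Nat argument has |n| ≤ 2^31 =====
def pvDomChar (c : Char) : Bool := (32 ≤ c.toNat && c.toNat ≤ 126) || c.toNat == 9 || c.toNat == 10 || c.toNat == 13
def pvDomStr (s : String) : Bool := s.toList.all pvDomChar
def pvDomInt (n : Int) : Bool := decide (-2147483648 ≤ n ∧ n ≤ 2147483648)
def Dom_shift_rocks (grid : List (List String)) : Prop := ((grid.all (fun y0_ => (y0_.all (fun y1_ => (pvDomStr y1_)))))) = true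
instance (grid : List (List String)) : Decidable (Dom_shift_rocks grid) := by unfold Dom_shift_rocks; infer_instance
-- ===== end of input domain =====

-- B slides the 'O' rocks of each column north by segmentation (count the 'O's between '#' barriers and
-- refill the segment) instead of A's moving write-pointer; both Pythons mutate `grid` in place the same
-- way and return it — the theorems below are about the returned value.

-- ===== PORT A =====
-- grid[r][c] read / write; Nat indices from range(...), exact for Python's in-range non-negative access
-- (Pre_ keeps every access in range).
def pvGetCell (g : List (List String)) (r c : Nat) : String := (g.getD r []).getD c ""
def pvSetCell (g : List (List String)) (r c : Nat) (v : String) : List (List String) :=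
  g.set r ((g.getD r []).set c v)

def pvAstep (col : Nat) (st : List (List String) × Nat) (row : Nat) : List (List String) × Nat :=
  if pvGetCell st.1 row col = "#" then (st.1, row + 1)
  else if pvGetCell st.1 row col = "O" then
    if st.2 = row then (st.1, st.2 + 1)
    else (pvSetCell (pvSetCell st.1 st.2 col "O") row col ".", st.2 + 1)
  else st

def shift_rocks (grid : List (List String)) : List (List String) :=
  (List.range grid.headI.length).foldl
    (fun g col => ((List.range g.length).foldl (pvAstep col) (g, 0)).1) grid

-- ===== PORT B =====
-- refill of one segment: for i in range(start, end): ...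
def pvBwrite (g : List (List String)) (col : Nat) (column : List String) (s e k : Nat) :
    List (List String) :=
  (List.range' s (e - s)).foldl
    (fun g i =>
      if i < s + k then pvSetCell g i col "O"
      else if column.getD i "" = "O" then pvSetCell g i col "."
      else pvSetCell g i col (column.getD i "")) g

def pvBstep (h col : Nat) (column : List String) (st : List (List String) × Nat) (e : Nat) :
    List (List String) × Nat :=
  if e = h ∨ column.getD e "" = "#" then
    (pvBwrite st.1 col column st.2 e
      ((List.range' st.2 (e - st.2)).countP (fun i => decide (column.getD i "" = "O"))), e + 1)
  else st

def shift_rocks_alt (grid : List (List String)) : List (List String) :=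
  (List.range grid.headI.length).foldl
    (fun g col =>
      ((List.range (grid.length + 1)).foldl
        (pvBstep grid.length col ((List.range grid.length).map (fun r => pvGetCell g r col)))
        (g, 0)).1)
    grid

-- ===== PRECONDITION & SPEC =====
-- Pre_ excludes exactly the inputs on which A raises IndexError: the empty grid (grid[0]),
-- and ragged grids where some row is shorter than row 0 (grid[row][col] with col < len(grid[0])).
def Pre_shift_rocks (grid : List (List String)) : Prop :=
  grid ≠ [] ∧ ∀ row ∈ grid, grid.headI.length ≤ row.length
instance (grid : List (List String)) : Decidable (Pre_shift_rocks grid) := by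
  unfold Pre_shift_rocks; infer_instance

def pvWitness_shift_rocks : List (List String) :=
  [[".", "O"], ["O", "#"], ["O", "O"]]

def Spec_shift_rocks (grid : List (List String)) (out : List (List String)) : Prop :=
  out = shift_rocks_alt grid
instance (grid : List (List String)) (out : List (List String)) :
    Decidable (Spec_shift_rocks grid out) := by unfold Spec_shift_rocks; infer_instance

-- ===== CLAIM (what is proved, stated in full; the proofs are below) =====
def Claim_equal_shift_rocks : Prop :=
  ∀ (grid : List (List String)), Dom_shift_rocks grid → Pre_shift_rocks grid →
    Spec_shift_rocks grid (shift_rocks grid)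

-- ===== LEMMAS AND PROOFS =====

-- list-of-strings equality from pointwise getD
theorem pvEqOfGetD {l1 l2 : List String} (hl : l1.length = l2.length)
    (h : ∀ r, l1.getD r "" = l2.getD r "") : l1 = l2 := by
  apply List.ext_getElem hl
  intro i h1 h2
  have := h i
  simpa [List.getD_eq_getElem?_getD, List.getElem?_eq_getElem, h1, h2] using this

theorem pvEqOfGetDL {l1 l2 : List (List String)} (hl : l1.length = l2.length)
    (h : ∀ r, l1.getD r [] = l2.getD r []) : l1 = l2 := by
  apply List.ext_getElem hl
  intro i h1 h2
  have := h i
  simpa [List.getD_eq_getElem?_getD, List.getElem?_eq_getElem, h1, h2] using this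

theorem pvGetDSet {α : Type} (l : List α) (d : α) (i : Nat) (v : α) (r : Nat) :
    (l.set i v).getD r d = if i = r ∧ i < l.length then v else l.getD r d := by
  simp only [List.getD_eq_getElem?_getD, List.getElem?_set]
  split_ifs <;> simp_all <;> omega

theorem pvSetGetDSelf (row : List String) (col : Nat) :
    row.set col (row.getD col "") = row := by
  rcases Nat.lt_or_ge col row.length with h | h
  · simp [List.getD_eq_getElem?_getD, List.getElem?_eq_getElem h]
  · exact List.set_eq_of_length_le h

-- the column of g at index col
def pvColOf (g : List (List String)) (col : Nat) : List String :=
  g.map (fun row => row.getD col "")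

-- write column c back into g at index col
def pvWr (g : List (List String)) (col : Nat) (c : List String) : List (List String) :=
  List.zipWith (fun row v => row.set col v) g c

-- column-level versions of the two loop bodies
def colStepA (st : List String × Nat) (row : Nat) : List String × Nat :=
  if st.1.getD row "" = "#" then (st.1, row + 1)
  else if st.1.getD row "" = "O" then
    if st.2 = row then (st.1, st.2 + 1)
    else ((st.1.set st.2 "O").set row ".", st.2 + 1)
  else st

def colBwrite (acc : List String) (column : List String) (s e k : Nat) : List String :=
  (List.range' s (e - s)).foldl
    (fun acc i =>
      if i < s + k then acc.set i "O"
      else if column.getD i "" = "O" then acc.set i "."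
      else acc.set i (column.getD i "")) acc

def colStepB (h : Nat) (column : List String) (st : List String × Nat) (e : Nat) :
    List String × Nat :=
  if e = h ∨ column.getD e "" = "#" then
    (colBwrite st.1 column st.2 e
      ((List.range' st.2 (e - st.2)).countP (fun i => decide (column.getD i "" = "O"))), e + 1)
  else st

theorem pvLenWr (g : List (List String)) (col : Nat) (c : List String)
    (hc : c.length = g.length) : (pvWr g col c).length = g.length := by
  simp [pvWr, hc]

theorem pvGetDWr (g : List (List String)) (col : Nat) (c : List String)
    (hc : c.length = g.length) (r : Nat) :
    (pvWr g col c).getD r [] =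
      if h : r < g.length then (g[r]).set col (c.getD r "") else [] := by
  split_ifs with h
  · have h2 : r < c.length := by omega
    have h3 : r < (pvWr g col c).length := by rw [pvLenWr g col c hc]; exact h
    have h4 : r < (List.zipWith (fun (row : List String) v => row.set col v) g c).length := h3
    simp only [pvWr, List.getD_eq_getElem?_getD, List.getElem?_eq_getElem h4,
      List.getElem_zipWith, Option.getD_some]
    simp [List.getD_eq_getElem?_getD, List.getElem?_eq_getElem h2]
  · have : (pvWr g col c).length ≤ r := by rw [pvLenWr g col c hc]; omega
    simp [List.getD_eq_getElem?_getD, List.getElem?_eq_none_iff.mpr this]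

theorem pvWrColOf (g : List (List String)) (col : Nat) : pvWr g col (pvColOf g col) = g := by
  have hc : (pvColOf g col).length = g.length := by simp [pvColOf]
  apply pvEqOfGetDL (by rw [pvLenWr g col _ hc])
  intro r
  rw [pvGetDWr g col _ hc r]
  split_ifs with h
  · have h2 : r < (pvColOf g col).length := by omega
    have : (pvColOf g col).getD r "" = g[r].getD col "" := by
      simp [pvColOf, List.getD_eq_getElem?_getD, List.getElem?_eq_getElem h2,
        List.getElem?_eq_getElem h]
    rw [this, pvSetGetDSelf]
    simp [List.getD_eq_getElem?_getD, List.getElem?_eq_getElem h]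
  · have h2 : g.length ≤ r := by omega
    simp [List.getD_eq_getElem?_getD, List.getElem?_eq_none_iff.mpr h2]

theorem pvGetCellWr (g : List (List String)) (col : Nat) (c : List String)
    (hc : c.length = g.length) (hrow : ∀ row ∈ g, col < row.length) (r : Nat) :
    pvGetCell (pvWr g col c) r col = c.getD r "" := by
  unfold pvGetCell
  rw [pvGetDWr g col c hc r]
  split_ifs with h
  · rw [pvGetDSet]
    have : col < (g[r]).length := hrow _ (List.getElem_mem h)
    simp [this]
  · have : c.length ≤ r := by omega
    simp [List.getD_eq_getElem?_getD, List.getElem?_eq_none_iff.mpr this]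

theorem pvSetCellWr (g : List (List String)) (col : Nat) (c : List String)
    (hc : c.length = g.length) (r : Nat) (v : String) :
    pvSetCell (pvWr g col c) r col v = pvWr g col (c.set r v) := by
  have hc2 : (c.set r v).length = g.length := by simp [hc]
  have hlen : (pvSetCell (pvWr g col c) r col v).length = g.length := by
    simp [pvSetCell, pvLenWr g col c hc]
  apply pvEqOfGetDL (by rw [hlen, pvLenWr g col _ hc2])
  intro i
  unfold pvSetCell
  rw [pvGetDSet, pvGetDWr g col _ hc2 i, pvLenWr g col c hc]
  by_cases hir : r = i ∧ r < g.length
  · obtain ⟨rfl, hr⟩ := hir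
    simp only [hr, and_true, if_pos rfl, if_pos (⟨rfl, hr⟩ : r = r ∧ r < g.length)]
    rw [pvGetDWr g col c hc r]
    simp only [hr, dif_pos]
    rw [List.set_set, pvGetDSet]
    have : r < c.length := by omega
    simp [this]
  · rw [if_neg hir, pvGetDWr g col c hc i]
    split_ifs with h
    · congr 1
      rw [pvGetDSet]
      rw [if_neg]
      intro ⟨h1, h2⟩
      exact hir ⟨h1, by omega⟩
    · rfl

theorem colStepA_len (st : List String × Nat) (r : Nat) :
    (colStepA st r).1.length = st.1.length := by
  unfold colStepA; split_ifs <;> simp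

theorem pvAstepLift (col : Nat) (g : List (List String)) (hrow : ∀ row ∈ g, col < row.length)
    (c : List String) (cur : Nat) (hc : c.length = g.length) (r : Nat) :
    pvAstep col (pvWr g col c, cur) r =
      (pvWr g col ((colStepA (c, cur) r).1), (colStepA (c, cur) r).2) := by
  unfold pvAstep colStepA
  simp only [pvGetCellWr g col c hc hrow r]
  split_ifs
  · rfl
  · rfl
  · rw [pvSetCellWr g col c hc cur "O", pvSetCellWr g col _ (by simp [hc]) r "."]
  · rfl

theorem pvLiftA (col : Nat) (g : List (List String)) (hrow : ∀ row ∈ g, col < row.length) :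
    ∀ (rs : List Nat) (c : List String) (cur : Nat), c.length = g.length →
      rs.foldl (pvAstep col) (pvWr g col c, cur) =
        (pvWr g col ((rs.foldl colStepA (c, cur)).1), (rs.foldl colStepA (c, cur)).2) := by
  intro rs
  induction rs with
  | nil => intro c cur hc; rfl
  | cons r rs ih =>
    intro c cur hc
    simp only [List.foldl_cons]
    rw [pvAstepLift col g hrow c cur hc r]
    have hl : (colStepA (c, cur) r).1.length = g.length := by rw [colStepA_len]; exact hc
    rw [ih _ _ hl]

theorem pvBwriteLift (col : Nat) (g : List (List String)) (column : List String)
    (s e k : Nat) :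
    ∀ (c : List String), c.length = g.length →
      pvBwrite (pvWr g col c) col column s e k = pvWr g col (colBwrite c column s e k) := by
  unfold pvBwrite colBwrite
  generalize (List.range' s (e - s)) = is
  induction is with
  | nil => intro c hc; rfl
  | cons i is ih =>
    intro c hc
    simp only [List.foldl_cons]
    split_ifs
    · rw [pvSetCellWr g col c hc i "O"]; exact ih _ (by simp [hc])
    · rw [pvSetCellWr g col c hc i "."]; exact ih _ (by simp [hc])
    · rw [pvSetCellWr g col c hc i _]; exact ih _ (by simp [hc])

theorem colBwrite_len (c column : List String) (s e k : Nat) :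
    (colBwrite c column s e k).length = c.length := by
  unfold colBwrite
  generalize (List.range' s (e - s)) = is
  induction is generalizing c with
  | nil => rfl
  | cons i is ih =>
    simp only [List.foldl_cons]
    split_ifs <;> rw [ih] <;> simp

theorem colStepB_len (h : Nat) (column : List String) (st : List String × Nat) (e : Nat) :
    (colStepB h column st e).1.length = st.1.length := by
  unfold colStepB; split_ifs <;> simp [colBwrite_len]

theorem pvLiftB (col h : Nat) (g : List (List String)) (column : List String) :
    ∀ (es : List Nat) (c : List String) (s : Nat), c.length = g.length →
      es.foldl (pvBstep h col column) (pvWr g col c, s) =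
        (pvWr g col ((es.foldl (colStepB h column) (c, s)).1),
          (es.foldl (colStepB h column) (c, s)).2) := by
  intro es
  induction es with
  | nil => intro c s hc; rfl
  | cons e es ih =>
    intro c s hc
    simp only [List.foldl_cons]
    have hstep : pvBstep h col column (pvWr g col c, s) e =
        (pvWr g col ((colStepB h column (c, s) e).1), (colStepB h column (c, s) e).2) := by
      unfold pvBstep colStepB
      split_ifs
      · rw [pvBwriteLift col g column _ _ _ c hc]
      · rfl
    rw [hstep]
    have hl : (colStepB h column (c, s) e).1.length = g.length := by
      rw [colStepB_len]; exact hc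
    rw [ih _ _ hl]

theorem foldBlen (h : Nat) (column : List String) : ∀ (es : List Nat) (c : List String) (s : Nat),
    ((es.foldl (colStepB h column) (c, s)).1).length = c.length := by
  intro es
  induction es with
  | nil => intro c s; rfl
  | cons e es ih =>
    intro c s
    simp only [List.foldl_cons]
    have := ih (colStepB h column (c, s) e).1 (colStepB h column (c, s) e).2
    rw [colStepB_len] at this
    simpa using this

theorem pvColumnEq (g : List (List String)) (col : Nat) :
    (List.range g.length).map (fun r => pvGetCell g r col) = pvColOf g col := by
  apply List.ext_getElem (by simp [pvColOf])
  intro i h1 h2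
  simp only [List.getElem_map, List.getElem_range, pvColOf, pvGetCell]
  have h3 : i < g.length := by simpa using h1
  simp [List.getD_eq_getElem?_getD, List.getElem?_eq_getElem h3]

theorem pvWrRowLen (g : List (List String)) (col : Nat) (d : List String) (W : Nat)
    (hg : ∀ row ∈ g, W ≤ row.length) : ∀ row ∈ pvWr g col d, W ≤ row.length := by
  intro row hrow
  unfold pvWr at hrow
  rw [List.mem_iff_getElem] at hrow
  obtain ⟨i, hi, rfl⟩ := hrow
  rw [List.getElem_zipWith]
  have hig : i < g.length := by
    have := hi; simp only [List.length_zipWith] at this; omega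
  have := hg _ (List.getElem_mem hig)
  simpa using this


-- number of "O" cells of column c among positions [s, s+n)
def countO (c : List String) (s n : Nat) : Nat :=
  (List.range' s n).countP (fun r => decide (c.getD r "" = "O"))

theorem countO_congr {c c' : List String} (s n : Nat)
    (h : ∀ r, s ≤ r → c.getD r "" = c'.getD r "") : countO c s n = countO c' s n := by
  unfold countO
  apply List.countP_congr
  intro r hr
  have : s ≤ r := (List.mem_range'_1.mp hr).1
  rw [h r this]

theorem countO_le (c : List String) (s n : Nat) : countO c s n ≤ n := by
  have := List.countP_le_length (l := List.range' s n)
    (p := fun r => decide (c.getD r "" = "O"))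
  simpa [countO] using this

theorem countO_succ (c : List String) (s n : Nat) :
    countO c s (n + 1) = (if c.getD s "" = "O" then 1 else 0) + countO c (s + 1) n := by
  unfold countO
  rw [List.range'_succ, List.countP_cons]
  by_cases h : c.getD s "" = "O"
  · simp only [h, decide_true, if_true]; omega
  · simp only [h, decide_false]; simp [h]

theorem colStepA_eq (c : List String) (cur r : Nat) :
    colStepA (c, cur) r =
      if c.getD r "" = "#" then (c, r + 1)
      else if c.getD r "" = "O" then
        (if cur = r then (c, cur + 1) else ((c.set cur "O").set r ".", cur + 1))
      else (c, cur) := rfl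

-- characterisation of A's pointer loop across one '#'-free stretch of rows
theorem A_run : ∀ (n : Nat) (c : List String) (s cur : Nat), cur ≤ s → s + n ≤ c.length →
    (∀ j < n, c.getD (s + j) "" ≠ "#") →
    ((List.range' s n).foldl colStepA (c, cur)).2 = cur + countO c s n ∧
    ((List.range' s n).foldl colStepA (c, cur)).1.length = c.length ∧
    ∀ r, ((List.range' s n).foldl colStepA (c, cur)).1.getD r "" =
      if cur ≤ r ∧ r < cur + countO c s n then "O"
      else if s ≤ r ∧ r < s + n ∧ c.getD r "" = "O" then "."
      else c.getD r "" := by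
  intro n
  induction n with
  | zero =>
    intro c s cur hcs hlen hnoh
    refine ⟨by simp [countO], by simp, ?_⟩
    intro r
    simp only [List.range'_zero, List.foldl_nil]
    have h0 : countO c s 0 = 0 := rfl
    rw [if_neg (by omega), if_neg (by omega)]
  | succ n ih =>
    intro c s cur hcs hlen hnoh
    rw [List.range'_succ]
    simp only [List.foldl_cons]
    have hs0 : c.getD s "" ≠ "#" := by have := hnoh 0 (by omega); simpa using this
    have hk := countO_succ c s n
    by_cases hO : c.getD s "" = "O"
    · rw [if_pos hO] at hk
      by_cases hcur : cur = s
      · -- the rock already sits at its target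
        have hstep : colStepA (c, cur) s = (c, cur + 1) := by
          rw [colStepA_eq, if_neg hs0, if_pos hO, if_pos hcur]
        rw [hstep]
        obtain ⟨h1, h2, h3⟩ := ih c (s + 1) (cur + 1) (by omega) (by omega)
          (fun j hj => by
            have := hnoh (j + 1) (by omega)
            rw [show s + 1 + j = s + (j + 1) by omega]
            exact this)
        refine ⟨by rw [h1, hk]; omega, h2, ?_⟩
        intro r
        rw [h3 r]
        have hkk : countO c s (n + 1) = 1 + countO c (s + 1) n := hk
        by_cases hr1 : cur + 1 ≤ r ∧ r < cur + 1 + countO c (s + 1) n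
        · rw [if_pos hr1, if_pos (by omega)]
        · rw [if_neg hr1]
          by_cases hr2 : s + 1 ≤ r ∧ r < s + 1 + n ∧ c.getD r "" = "O"
          · rw [if_pos hr2, if_neg (by omega), if_pos ⟨by omega, by omega, hr2.2.2⟩]
          · rw [if_neg hr2]
            by_cases hr3 : cur ≤ r ∧ r < cur + countO c s (n + 1)
            · -- only r = cur is new; there c itself is "O"
              have hrc : r = cur := by omega
              rw [if_pos hr3, hrc, hcur, hO]
            · rw [if_neg hr3, if_neg (by
                intro ⟨a, b, d⟩
                rcases Nat.eq_or_lt_of_le a with h | h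
                · exact hr3 ⟨by omega, by omega⟩
                · exact hr2 ⟨by omega, by omega, d⟩)]
      · -- the rock moves up to position cur < s
        have hcur' : cur < s := by omega
        have hstep : colStepA (c, cur) s = ((c.set cur "O").set s ".", cur + 1) := by
          rw [colStepA_eq, if_neg hs0, if_pos hO, if_neg hcur]
        rw [hstep]
        have hslen : s < c.length := by omega
        have hclen : cur < c.length := by omega
        set c2 := (c.set cur "O").set s "." with hc2
        have hc2get : ∀ r, c2.getD r "" =
            if s = r then "." else if cur = r then "O" else c.getD r "" := by
          intro r
          rw [hc2, pvGetDSet, pvGetDSet]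
          simp only [List.length_set]
          split_ifs with a b c d e <;> first | rfl | omega
        have hagree : ∀ r, s + 1 ≤ r → c2.getD r "" = c.getD r "" := by
          intro r hr
          rw [hc2get, if_neg (by omega), if_neg (by omega)]
        obtain ⟨h1, h2, h3⟩ := ih c2 (s + 1) (cur + 1) (by omega)
          (by simp [hc2]; omega)
          (fun j hj => by
            rw [hagree (s + 1 + j) (by omega)]
            have := hnoh (j + 1) (by omega)
            rw [show s + 1 + j = s + (j + 1) by omega]
            exact this)
        have hcnt : countO c2 (s + 1) n = countO c (s + 1) n := by
          apply countO_congr; intro r hr; exact hagree r hr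
        refine ⟨by rw [h1, hcnt, hk]; omega, by rw [h2]; simp [hc2], ?_⟩
        intro r
        rw [h3 r, hcnt]
        by_cases hr1 : cur + 1 ≤ r ∧ r < cur + 1 + countO c (s + 1) n
        · rw [if_pos hr1, if_pos (by omega)]
        · rw [if_neg hr1]
          by_cases hr2 : s + 1 ≤ r ∧ r < s + 1 + n ∧ c2.getD r "" = "O"
          · have : c.getD r "" = "O" := by rw [← hagree r (by omega)]; exact hr2.2.2
            rw [if_pos hr2, if_neg (by omega), if_pos ⟨by omega, by omega, this⟩]
          · rw [if_neg hr2, hc2get]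
            by_cases hrs : s = r
            · -- position s lost its rock (it moved to cur) unless it is a target
              rw [if_pos hrs]
              have hks : countO c s (n + 1) ≥ 1 := by omega
              by_cases ht : r < cur + countO c s (n + 1)
              · rw [if_pos ⟨by omega, ht⟩]
                exfalso
                exact hr1 ⟨by omega, by omega⟩
              · rw [if_neg (by omega), if_pos ⟨by omega, by omega, by rw [← hrs]; exact hO⟩]
            · rw [if_neg hrs]
              by_cases hrc : cur = r
              · rw [if_pos hrc, if_pos ⟨by omega, by omega⟩]
              · rw [if_neg hrc]
                by_cases hr3 : cur ≤ r ∧ r < cur + countO c s (n + 1)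
                · exfalso
                  exact hr1 ⟨by omega, by omega⟩
                · rw [if_neg hr3, if_neg (by
                    intro ⟨a, b, d⟩
                    exact hr2 ⟨by omega, by omega, by rw [hagree r (by omega)]; exact d⟩)]
    · -- an inert cell: nothing happens
      have hstep : colStepA (c, cur) s = (c, cur) := by
        rw [colStepA_eq, if_neg hs0, if_neg hO]
      rw [hstep]
      rw [if_neg hO] at hk
      obtain ⟨h1, h2, h3⟩ := ih c (s + 1) cur (by omega) (by omega)
        (fun j hj => by
          have := hnoh (j + 1) (by omega)
          rw [show s + 1 + j = s + (j + 1) by omega]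
          exact this)
      refine ⟨by rw [h1, hk]; omega, h2, ?_⟩
      intro r
      rw [h3 r]
      by_cases hr1 : cur ≤ r ∧ r < cur + countO c (s + 1) n
      · rw [if_pos hr1, if_pos (by omega)]
      · rw [if_neg hr1]
        by_cases hr2 : s + 1 ≤ r ∧ r < s + 1 + n ∧ c.getD r "" = "O"
        · rw [if_pos hr2, if_neg (by omega), if_pos ⟨by omega, by omega, hr2.2.2⟩]
        · rw [if_neg hr2, if_neg (by omega), if_neg (by
            intro ⟨a, b, d⟩
            rcases Nat.eq_or_lt_of_le a with h | h
            · exact hO (by rw [h]; exact d)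
            · exact hr2 ⟨by omega, by omega, d⟩)]

-- B's refill writes, characterised pointwise (t: where the remaining writes start)
def bwF (c : List String) (s k : Nat) : List String → Nat → List String := fun acc i =>
  if i < s + k then acc.set i "O"
  else if c.getD i "" = "O" then acc.set i "."
  else acc.set i (c.getD i "")

theorem colBwrite_eq (acc c : List String) (s e k : Nat) :
    colBwrite acc c s e k = (List.range' s (e - s)).foldl (bwF c s k) acc := rfl

theorem B_write : ∀ (n : Nat) (acc c : List String) (s k t : Nat), t + n ≤ acc.length →
    ((List.range' t n).foldl (bwF c s k) acc).length = acc.length ∧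
    ∀ r, ((List.range' t n).foldl (bwF c s k) acc).getD r "" =
      if t ≤ r ∧ r < t + n then
        (if r < s + k then "O" else if c.getD r "" = "O" then "." else c.getD r "")
      else acc.getD r "" := by
  intro n
  induction n with
  | zero =>
    intro acc c s k t hlen
    refine ⟨by simp, ?_⟩
    intro r
    simp only [List.range'_zero, List.foldl_nil]
    rw [if_neg (by omega)]
  | succ n ih =>
    intro acc c s k t hlen
    rw [List.range'_succ]
    simp only [List.foldl_cons]
    have ht : t < acc.length := by omega
    set v := if t < s + k then "O" else if c.getD t "" = "O" then "." else c.getD t "" with hv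
    have hstep : bwF c s k acc t = acc.set t v := by
      rw [hv]; unfold bwF; split_ifs <;> rfl
    rw [hstep]
    obtain ⟨h1, h2⟩ := ih (acc.set t v) c s k (t + 1) (by simp; omega)
    refine ⟨by rw [h1]; simp, ?_⟩
    intro r
    rw [h2 r]
    by_cases hr1 : t + 1 ≤ r ∧ r < t + 1 + n
    · rw [if_pos hr1, if_pos (show t ≤ r ∧ r < t + (n + 1) by omega)]
    · rw [if_neg hr1, pvGetDSet]
      by_cases hrt : t = r
      · rw [if_pos ⟨hrt, ht⟩, if_pos (show t ≤ r ∧ r < t + (n + 1) by omega), hv, hrt]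
      · rw [if_neg (show ¬(t = r ∧ t < acc.length) by intro ⟨a, b⟩; exact hrt a),
            if_neg (show ¬(t ≤ r ∧ r < t + (n + 1)) by omega)]

theorem colStepB_eq (h : Nat) (column : List String) (c : List String) (s e : Nat) :
    colStepB h column (c, s) e =
      if e = h ∨ column.getD e "" = "#" then
        (colBwrite c column s e
          ((List.range' s (e - s)).countP (fun i => decide (column.getD i "" = "O"))), e + 1)
      else (c, s) := rfl

-- B's scan skips every non-boundary index
theorem B_skip : ∀ (n : Nat) (c acc : List String) (s t h : Nat),
    (∀ j < n, t + j ≠ h ∧ c.getD (t + j) "" ≠ "#") →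
    (List.range' t n).foldl (colStepB h c) (acc, s) = (acc, s) := by
  intro n
  induction n with
  | zero => intro c acc s t h _; rfl
  | succ n ih =>
    intro c acc s t h hj
    rw [List.range'_succ]
    simp only [List.foldl_cons]
    have h0 := hj 0 (by omega)
    have hstep : colStepB h c (acc, s) t = (acc, s) := by
      rw [colStepB_eq, if_neg (by simpa using h0)]
    rw [hstep]
    exact ih c acc s (t + 1) h (fun j hjn => by
      have := hj (j + 1) (by omega)
      rw [show t + 1 + j = t + (j + 1) by omega]
      exact this)

-- main segment induction: from any '#'-boundary, A's pointer loop and B's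
-- count-and-refill loop produce the same column
theorem M : ∀ (n : Nat) (c cc : List String) (s : Nat), cc.length = c.length →
    s + n = c.length → (∀ r, s ≤ r → cc.getD r "" = c.getD r "") →
    ((List.range' s n).foldl colStepA (cc, s)).1 =
      ((List.range' s (n + 1)).foldl (colStepB c.length c) (cc, s)).1 := by
  intro n
  induction n using Nat.strong_induction_on with
  | _ n ih =>
    intro c cc s hlen hsn hagree
    have hPn : n = n ∨ c.getD (s + n) "" = "#" := Or.inl rfl
    set P := fun j => j = n ∨ c.getD (s + j) "" = "#" with hP
    have hPex : ∃ j, P j := ⟨n, hPn⟩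
    classical
    set m := Nat.find hPex with hm
    have hPm : P m := Nat.find_spec hPex
    have hmin : ∀ j, j < m → ¬ P j := fun j hj => Nat.find_min hPex hj
    have hmn : m ≤ n := Nat.find_min' hPex hPn
    -- split off the '#'-free stretch [s, s+m)
    have hAsplit : List.range' s n = List.range' s m ++ List.range' (s + m) (n - m) := by
      rw [List.range'_append_1]
      congr 1
      omega
    have hBsplit : List.range' s (n + 1) =
        List.range' s m ++ ((s + m) :: List.range' (s + m + 1) (n - m)) := by
      rw [← List.range'_succ, List.range'_append_1]
      congr 1
      omega
    have hnoh : ∀ j < m, cc.getD (s + j) "" ≠ "#" := by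
      intro j hj
      rw [hagree (s + j) (by omega)]
      intro hcon
      exact hmin j hj (Or.inr hcon)
    obtain ⟨hA1, hA2, hA3⟩ := A_run m cc s s (le_refl s) (by omega) hnoh
    set ccA := ((List.range' s m).foldl colStepA (cc, s)).1 with hccA
    set k := countO cc s m with hk
    have hkc : countO c s m = k := by
      rw [hk]; exact (countO_congr s m hagree).symm
    have hkm : k ≤ m := by rw [hk]; exact countO_le cc s m
    -- B: skip to the boundary, then one refill
    have hskip := B_skip m c cc s s c.length (fun j hj => by
      constructor
      · omega
      · intro hcon; exact hmin j hj (Or.inr hcon))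
    have htrig : (s + m = c.length ∨ c.getD (s + m) "" = "#") := by
      rcases hPm with h | h
      · left; omega
      · right; exact h
    have hBstep : colStepB c.length c (cc, s) (s + m) =
        (colBwrite cc c s (s + m) k, s + m + 1) := by
      rw [colStepB_eq, if_pos htrig]
      have : ((List.range' s (s + m - s)).countP (fun i => decide (c.getD i "" = "O"))) = k := by
        show countO c s (s + m - s) = k
        rw [show s + m - s = m by omega, hkc]
      rw [this]
    set ccB := colBwrite cc c s (s + m) k with hccB
    have hccB2 : ccB = (List.range' s m).foldl (bwF c s k) cc := by
      rw [hccB, colBwrite_eq, show s + m - s = m by omega]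
    obtain ⟨hB1, hB2⟩ : ccB.length = cc.length ∧ ∀ r, ccB.getD r "" =
        if s ≤ r ∧ r < s + m then
          (if r < s + k then "O" else if c.getD r "" = "O" then "." else c.getD r "")
        else cc.getD r "" := by
      rw [hccB2]
      exact B_write m cc c s k s (by omega)
    -- the two columns agree after the segment
    have hAB : ccA = ccB := by
      apply pvEqOfGetD (by rw [hA2, hB1])
      intro r
      rw [hA3 r, hB2 r]
      by_cases hr1 : s ≤ r ∧ r < s + k
      · rw [if_pos (show s ≤ r ∧ r < s + countO cc s m by omega),
            if_pos (show s ≤ r ∧ r < s + m by omega),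
            if_pos (show r < s + k by omega)]
      · rw [if_neg (show ¬(s ≤ r ∧ r < s + countO cc s m) by omega)]
        by_cases hr2 : s ≤ r ∧ r < s + m
        · rw [if_pos hr2]
          by_cases hO : c.getD r "" = "O"
          · rw [if_pos (show s ≤ r ∧ r < s + m ∧ cc.getD r "" = "O" from
                  ⟨hr2.1, hr2.2, by rw [hagree r hr2.1]; exact hO⟩),
                if_neg (show ¬ r < s + k by omega), if_pos hO]
          · rw [if_neg (show ¬(s ≤ r ∧ r < s + m ∧ cc.getD r "" = "O") from by
                  intro ⟨a, b, d⟩; exact hO (by rw [← hagree r a]; exact d)),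
                if_neg (show ¬ r < s + k by omega), if_neg hO, hagree r hr2.1]
        · rw [if_neg hr2, if_neg (show ¬(s ≤ r ∧ r < s + m ∧ cc.getD r "" = "O") from by
              intro ⟨a, b, d⟩; exact hr2 ⟨a, b⟩)]
    rw [hAsplit, hBsplit, List.foldl_append, List.foldl_append]
    rw [hskip]
    simp only [List.foldl_cons]
    rw [hBstep]
    have hst : ((List.range' s m).foldl colStepA (cc, s)) = (ccA, s + k) := by
      rw [hccA, ← hA1]
    rw [hst]
    rcases Nat.eq_or_lt_of_le hmn with hmeq | hmlt
    · -- the stretch runs to the bottom: both remainders are empty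
      rw [show n - m = 0 by omega]
      simp only [List.range'_zero, List.foldl_nil]
      exact hAB
    · -- a '#' at s+m: A consumes it, then both recurse from s+m+1
      have hhash : c.getD (s + m) "" = "#" := by
        rcases hPm with h | h
        · omega
        · exact h
      have hccAhash : ccA.getD (s + m) "" = "#" := by
        rw [hA3 (s + m), if_neg (show ¬(s ≤ s + m ∧ s + m < s + k) by omega),
          if_neg (show ¬(s ≤ s + m ∧ s + m < s + m ∧ cc.getD (s + m) "" = "O") from by
            intro ⟨a, b, d⟩; omega),
          hagree (s + m) (by omega)]
        exact hhash
      have hAstep : (List.range' (s + m) (n - m)).foldl colStepA (ccA, s + k) =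
          (List.range' (s + m + 1) (n - m - 1)).foldl colStepA (ccA, s + m + 1) := by
        rw [show n - m = (n - m - 1) + 1 by omega, List.range'_succ]
        simp only [List.foldl_cons]
        congr 1
        rw [colStepA_eq, if_pos hccAhash]
      rw [hAstep, ← hAB]
      have hagree2 : ∀ r, s + m + 1 ≤ r → ccA.getD r "" = c.getD r "" := by
        intro r hr
        rw [hA3 r, if_neg (show ¬(s ≤ r ∧ r < s + k) by omega),
          if_neg (show ¬(s ≤ r ∧ r < s + m ∧ cc.getD r "" = "O") from by
            intro ⟨a, b, d⟩; omega)]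
        exact hagree r (by omega)
      have := ih (n - m - 1) (by omega) c ccA (s + m + 1)
        (by rw [hA2, hlen]) (by omega) hagree2
      rw [show n - m - 1 + 1 = n - m by omega] at this
      exact this

theorem colAB (c : List String) :
    ((List.range c.length).foldl colStepA (c, 0)).1 =
      ((List.range (c.length + 1)).foldl (colStepB c.length c) (c, 0)).1 := by
  rw [List.range_eq_range', List.range_eq_range']
  exact M c.length c c 0 rfl (by omega) (fun r _ => rfl)

theorem pvOuter (W H : Nat) : ∀ (cols : List Nat) (g : List (List String)),
    g.length = H → (∀ row ∈ g, W ≤ row.length) → (∀ col ∈ cols, col < W) →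
    cols.foldl (fun g col => ((List.range g.length).foldl (pvAstep col) (g, 0)).1) g =
      cols.foldl (fun g col =>
        ((List.range (H + 1)).foldl
          (pvBstep H col ((List.range H).map (fun r => pvGetCell g r col))) (g, 0)).1) g := by
  intro cols
  induction cols with
  | nil => intro g hH hW hcols; rfl
  | cons col cols ih =>
    intro g hH hW hcols
    simp only [List.foldl_cons]
    have hcol : col < W := hcols col (List.mem_cons_self ..)
    have hrow : ∀ row ∈ g, col < row.length := fun row hr => lt_of_lt_of_le hcol (hW row hr)
    have hc : (pvColOf g col).length = g.length := by simp [pvColOf]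
    -- A's inner loop, lifted to the column
    have hA : ((List.range g.length).foldl (pvAstep col) (g, 0)).1 =
        pvWr g col (((List.range g.length).foldl colStepA (pvColOf g col, 0)).1) := by
      rw [show ((g, 0) : List (List String) × Nat) = (pvWr g col (pvColOf g col), 0) by
        rw [pvWrColOf]]
      rw [pvLiftA col g hrow _ _ _ hc]
    -- B's inner loop, lifted to the column
    have hB : ((List.range (H + 1)).foldl
          (pvBstep H col ((List.range H).map (fun r => pvGetCell g r col))) (g, 0)).1 =
        pvWr g col (((List.range (H + 1)).foldl (colStepB H (pvColOf g col)) (pvColOf g col, 0)).1) := by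
      rw [← hH, pvColumnEq g col]
      rw [show ((g, 0) : List (List String) × Nat) = (pvWr g col (pvColOf g col), 0) by
        rw [pvWrColOf]]
      rw [pvLiftB col g.length g (pvColOf g col) _ _ _ hc]
    have hcl : (pvColOf g col).length = H := by rw [hc, hH]
    have hcore : ((List.range g.length).foldl colStepA (pvColOf g col, 0)).1 =
        ((List.range (H + 1)).foldl (colStepB H (pvColOf g col)) (pvColOf g col, 0)).1 := by
      have := colAB (pvColOf g col)
      rw [hcl] at this
      rw [← hH, ← hc]
      rw [hc, hH]
      exact this
    rw [hA, hB, hcore]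
    -- recurse with the invariant re-established
    set d := ((List.range (H + 1)).foldl (colStepB H (pvColOf g col)) (pvColOf g col, 0)).1 with hd
    have hdl : d.length = g.length := by rw [hd, foldBlen, hc]
    exact ih (pvWr g col d) (by rw [pvLenWr g col d hdl, hH])
      (pvWrRowLen g col d W hW) (fun c hcm => hcols c (List.mem_cons_of_mem _ hcm))

-- ===== VERDICT (by name: the statement is the Claim_ definition above) =====
theorem shift_rocks_spec : Claim_equal_shift_rocks := by
  intro grid _ hpre
  unfold Spec_shift_rocks shift_rocks shift_rocks_alt
  exact pvOuter grid.headI.length grid.length (List.range grid.headI.length) grid rfl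
    hpre.2 (fun col hcol => List.mem_range.mp hcol)
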